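-- pv_equiv track=rewrite | github.com/noxenberg/supaniga | supaniga2.py | sufficiency_report
-- ===== SOURCE A (Python) =====
-- from typing import List, Dict, Tuple, Optional
--
-- CATEGORIES = {
--     "protein": {"chicken","beef","pork","egg","tofu","tempeh","shrimp","salmon","tuna","chickpeas","lentils","beans","paneer","ham","bacon","sausage"},
--     "carb": {"rice","jasmine rice","basmati rice","noodles","pasta","spaghetti","tortilla","bread","quinoa","couscous","udon","soba","ramen noodles","potato"},
--     "flavor": {"soy sauce","fish sauce","oyster sauce","tomato paste","curry paste","curry powder","turmeric","cumin","coriander","paprika","chili powder","garam masala","vinegar","balsamic vinegar","miso","gochujang","sriracha","tahini"},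
--     "veg": {"tomato","onion","garlic","ginger","carrot","spinach","broccoli","bell pepper","mushroom","olive","capers","pickles","nori"}
-- }
--
-- MIN_REQUIRED = {"protein": 1, "carb": 1, "flavor": 1, "veg": 1}
--
-- def categorize(ing: str) -> List[str]:
--     cats = []
--     for k, s in CATEGORIES.items():
--         if ing in s:
--             cats.append(k)
--     return cats
--
-- def sufficiency_report(ings: List[str]) -> Tuple[bool, Dict[str, int], Dict[str, int]]:
--     have = {k:0 for k in CATEGORIES}
--     for ing in ings:
--         for k in categorize(ing):
--             have[k] += 1
--     missing = {k: max(0, MIN_REQUIRED[k]-have[k]) for k in MIN_REQUIRED}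
--     ok = all(missing[k] == 0 for k in missing)
--     return ok, have, missing
-- ===== SOURCE B (Python) =====
-- from typing import List, Dict, Tuple, Optional
--
-- CATEGORIES = {
--     "protein": {"chicken","beef","pork","egg","tofu","tempeh","shrimp","salmon","tuna","chickpeas","lentils","beans","paneer","ham","bacon","sausage"},
--     "carb": {"rice","jasmine rice","basmati rice","noodles","pasta","spaghetti","tortilla","bread","quinoa","couscous","udon","soba","ramen noodles","potato"},
--     "flavor": {"soy sauce","fish sauce","oyster sauce","tomato paste","curry paste","curry powder","turmeric","cumin","coriander","paprika","chili powder","garam masala","vinegar","balsamic vinegar","miso","gochujang","sriracha","tahini"},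
--     "veg": {"tomato","onion","garlic","ginger","carrot","spinach","broccoli","bell pepper","mushroom","olive","capers","pickles","nori"}
-- }
--
-- MIN_REQUIRED = {"protein": 1, "carb": 1, "flavor": 1, "veg": 1}
--
-- def sufficiency_report(ings: List[str]) -> Tuple[bool, Dict[str, int], Dict[str, int]]:
--     # Histogram approach: collapse ings into a frequency table once, then tally
--     # each category from the DISTINCT ingredients' counts (duplicates handled by
--     # the counts, not by re-scanning the list).
--     freq = {}
--     for ing in ings:
--         freq[ing] = freq.get(ing, 0) + 1
--     have = {k: sum(c for i, c in freq.items() if i in s) for k, s in CATEGORIES.items()}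
--     missing = {k: max(0, m - have[k]) for k, m in MIN_REQUIRED.items()}
--     ok = not any(missing.values())
--     return ok, have, missing
-- ===== Notes on version B (the rewrite author's own statement) =====
-- stated objective: alternative
-- what changed: B replaces A's per-occurrence categorize-and-increment loop with a two-stage histogram algorithm: it first builds a frequency dict of the ingredients, then tallies each category by summing the counts of the distinct ingredients that belong to the category's set, and derives missing/ok from that.
import Mathlib
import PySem

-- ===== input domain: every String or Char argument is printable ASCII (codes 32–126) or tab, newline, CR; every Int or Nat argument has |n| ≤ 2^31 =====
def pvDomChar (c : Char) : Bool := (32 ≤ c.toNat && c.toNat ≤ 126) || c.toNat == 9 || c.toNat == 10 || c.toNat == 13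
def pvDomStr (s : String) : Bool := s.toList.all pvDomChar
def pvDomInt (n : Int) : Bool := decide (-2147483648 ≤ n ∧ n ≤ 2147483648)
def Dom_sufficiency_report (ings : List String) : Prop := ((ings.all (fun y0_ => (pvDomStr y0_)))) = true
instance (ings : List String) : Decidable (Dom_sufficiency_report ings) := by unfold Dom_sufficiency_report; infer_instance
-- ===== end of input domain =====

-- B first collapses ings into a frequency table (histogram) and then tallies each
-- category from the distinct ingredients' counts; same values as A, no speed claim.

-- ===== PORT A =====
def pvSetProtein : PySem.Set String := ["chicken","beef","pork","egg","tofu","tempeh","shrimp","salmon","tuna","chickpeas","lentils","beans","paneer","ham","bacon","sausage"]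
def pvSetCarb : PySem.Set String := ["rice","jasmine rice","basmati rice","noodles","pasta","spaghetti","tortilla","bread","quinoa","couscous","udon","soba","ramen noodles","potato"]
def pvSetFlavor : PySem.Set String := ["soy sauce","fish sauce","oyster sauce","tomato paste","curry paste","curry powder","turmeric","cumin","coriander","paprika","chili powder","garam masala","vinegar","balsamic vinegar","miso","gochujang","sriracha","tahini"]
def pvSetVeg : PySem.Set String := ["tomato","onion","garlic","ginger","carrot","spinach","broccoli","bell pepper","mushroom","olive","capers","pickles","nori"]

def pvCATEGORIES : List (String × PySem.Set String) :=
  [("protein", pvSetProtein), ("carb", pvSetCarb), ("flavor", pvSetFlavor), ("veg", pvSetVeg)]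

def pvMIN_REQUIRED : PySem.Dict String Int :=
  PySem.Dict.ofList [("protein", 1), ("carb", 1), ("flavor", 1), ("veg", 1)]

def categorize (ing : String) : List String :=
  pvCATEGORIES.foldl (fun cats ks => if PySem.Set.contains ks.2 ing then cats ++ [ks.1] else cats) []

def sufficiency_report (ings : List String) : Bool × (List (String × Int)) × (List (String × Int)) :=
  let have0 : PySem.Dict String Int := PySem.Dict.ofList (pvCATEGORIES.map (fun ks => (ks.1, (0 : Int))))
  let haveD := ings.foldl (fun d ing => (categorize ing).foldl (fun d k => d.modify k 0 (· + 1)) d) have0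
  let missing : PySem.Dict String Int :=
    PySem.Dict.ofList (pvMIN_REQUIRED.keys.map (fun k => (k, max 0 (pvMIN_REQUIRED.getD k 0 - haveD.getD k 0))))
  let ok := missing.keys.all (fun k => missing.getD k 0 == 0)
  (ok, haveD.items, missing.items)

-- ===== PORT B =====
def sufficiency_report_alt (ings : List String) : Bool × (List (String × Int)) × (List (String × Int)) :=
  -- freq[ing] = freq.get(ing, 0) + 1 over ings
  let freq : PySem.Dict String Int := ings.foldl (fun d x => d.insert x (d.getD x 0 + 1)) PySem.Dict.empty
  -- have = {k: sum(c for i, c in freq.items() if i in s) for k, s in CATEGORIES.items()}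
  let haveD : PySem.Dict String Int :=
    PySem.Dict.ofList (pvCATEGORIES.map (fun ks =>
      (ks.1, freq.items.foldl (fun a ic => if PySem.Set.contains ks.2 ic.1 then a + ic.2 else a) (0 : Int))))
  let missing : PySem.Dict String Int :=
    PySem.Dict.ofList (pvMIN_REQUIRED.items.map (fun km => (km.1, max 0 (km.2 - haveD.getD km.1 0))))
  let ok := !(missing.values.any (fun v => !(v == 0)))
  (ok, haveD.items, missing.items)

-- ===== PRECONDITION & SPEC =====
def Spec_sufficiency_report (ings : List String) (out : Bool × (List (String × Int)) × (List (String × Int))) : Prop := out = sufficiency_report_alt ings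
instance (ings : List String) (out : Bool × (List (String × Int)) × (List (String × Int))) : Decidable (Spec_sufficiency_report ings out) := by unfold Spec_sufficiency_report; infer_instance

-- ===== CLAIM =====
def Claim_equal_sufficiency_report : Prop := ∀ (ings : List String), Dom_sufficiency_report ings → Spec_sufficiency_report ings (sufficiency_report ings)

-- ===== LEMMAS AND PROOFS =====

-- occurrence count of members of s (A's per-occurrence tally), folded from an arbitrary start
def pvCnt (s : PySem.Set String) (a : Int) (ings : List String) : Int :=
  ings.foldl (fun c ing => if PySem.Set.contains s ing then c + 1 else c) a

lemma pvCnt_cons (s : PySem.Set String) (a : Int) (x : String) (xs : List String) :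
    pvCnt s a (x :: xs) = pvCnt s (if PySem.Set.contains s x then a + 1 else a) xs := rfl

-- one step of A's outer loop on the concrete four-key dict
lemma modify_step (x : String) (a b c d : Int) :
    (categorize x).foldl (fun d k => d.modify k 0 (· + 1))
      (PySem.Dict.mk [("protein", a), ("carb", b), ("flavor", c), ("veg", d)])
    = PySem.Dict.mk
        [("protein", if PySem.Set.contains pvSetProtein x then a + 1 else a),
         ("carb", if PySem.Set.contains pvSetCarb x then b + 1 else b),
         ("flavor", if PySem.Set.contains pvSetFlavor x then c + 1 else c),
         ("veg", if PySem.Set.contains pvSetVeg x then d + 1 else d)] := by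
  simp only [categorize, pvCATEGORIES, List.foldl_cons, List.foldl_nil]
  split_ifs <;>
    simp [PySem.Dict.modify, PySem.Dict.insert, PySem.Dict.contains, PySem.Dict.getD,
          PySem.Dict.get?]

lemma have_fold_eq (ings : List String) : ∀ (a b c d : Int),
    ings.foldl (fun d ing => (categorize ing).foldl (fun d k => d.modify k 0 (· + 1)) d)
      (PySem.Dict.mk [("protein", a), ("carb", b), ("flavor", c), ("veg", d)])
    = PySem.Dict.mk
       [("protein", pvCnt pvSetProtein a ings), ("carb", pvCnt pvSetCarb b ings),
        ("flavor", pvCnt pvSetFlavor c ings), ("veg", pvCnt pvSetVeg d ings)] := by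
  induction ings with
  | nil => intro a b c d; simp [pvCnt]
  | cons x xs ih =>
      intro a b c d
      rw [List.foldl_cons, modify_step, ih]
      simp [pvCnt_cons]

-- B side: the histogram fold is Counter(ings), and summing members' counts is pvCnt

lemma pvCnt_eq_countP (s : PySem.Set String) (xs : List String) : ∀ a : Int,
    pvCnt s a xs = a + (xs.countP (fun y => PySem.Set.contains s y) : Int) := by
  induction xs with
  | nil => intro a; simp [pvCnt]
  | cons x t ih =>
      intro a
      rw [pvCnt_cons, ih, List.countP_cons]
      by_cases h : x ∈ s <;> simp [h] <;> push_cast <;> ring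

lemma sum_indicator_zero (s : PySem.Set String) (x : String) :
    ∀ ds : List String, x ∉ ds →
    ((ds.map (fun k => if PySem.Set.contains s k && (k == x) then (1 : Int) else 0)).sum = 0) := by
  intro ds
  induction ds with
  | nil => intro _; simp
  | cons d rest ih =>
      intro h
      have hdx : d ≠ x := fun he => h (by simp [he])
      have hrest := ih (fun hm => h (List.mem_cons_of_mem _ hm))
      rw [List.map_cons, List.sum_cons, hrest]
      simp [hdx]

lemma sum_indicator_one (s : PySem.Set String) (x : String) :
    ∀ ds : List String, ds.Nodup → x ∈ ds →
    ((ds.map (fun k => if PySem.Set.contains s k && (k == x) then (1 : Int) else 0)).sum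
      = if PySem.Set.contains s x then 1 else 0) := by
  intro ds
  induction ds with
  | nil => intro _ h; cases h
  | cons d rest ih =>
      intro hnd hmem
      rcases List.mem_cons.mp hmem with he | hm
      · subst he
        have hx : x ∉ rest := (List.nodup_cons.mp hnd).1
        rw [List.map_cons, List.sum_cons, sum_indicator_zero s x rest hx]
        by_cases h : x ∈ s <;> simp [h]
      · have hdx : d ≠ x := fun he => (List.nodup_cons.mp hnd).1 (he ▸ hm)
        rw [List.map_cons, List.sum_cons, ih (List.nodup_cons.mp hnd).2 hm]
        simp [hdx]

lemma weighted_sum_eq_countP (s : PySem.Set String) (ds : List String)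
    (hnd : ds.Nodup) :
    ∀ xs : List String, (∀ y ∈ xs, y ∈ ds) →
    ((ds.map (fun k => if PySem.Set.contains s k then (xs.count k : Int) else 0)).sum
      = (xs.countP (fun y => PySem.Set.contains s y) : Int)) := by
  intro xs
  induction xs with
  | nil => intro _; simp
  | cons x t ih =>
      intro hsub
      have hx : x ∈ ds := hsub x (by simp)
      have ht : ∀ y ∈ t, y ∈ ds := fun y hy => hsub y (by simp [hy])
      have hpt : ds.map (fun k => if PySem.Set.contains s k then ((x :: t).count k : Int) else 0)
          = ds.map (fun k =>
              (if PySem.Set.contains s k then (t.count k : Int) else 0)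
              + (if PySem.Set.contains s k && (k == x) then (1 : Int) else 0)) := by
        apply List.map_congr_left
        intro k _
        rw [List.count_cons]
        by_cases h2 : k = x
        · subst h2
          by_cases h : k ∈ s <;> simp [h] <;> push_cast <;> ring
        · by_cases h : k ∈ s <;> simp [h, h2, Ne.symm h2] <;> push_cast <;> ring
      rw [hpt, PySem.List.sum_map_add_int, ih ht, sum_indicator_one s x ds hnd hx,
          List.countP_cons]
      by_cases h : x ∈ s <;> simp [h] <;> push_cast <;> ring

-- the foldl B uses, turned into the sum above
lemma foldl_if_add (s : PySem.Set String) (w : String → Int) :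
    ∀ (ds : List String) (a : Int),
    ds.foldl (fun a k => if PySem.Set.contains s k then a + w k else a) a
      = a + (ds.map (fun k => if PySem.Set.contains s k then w k else 0)).sum := by
  intro ds
  induction ds with
  | nil => intro a; simp
  | cons d rest ih =>
      intro a
      rw [List.foldl_cons, ih, List.map_cons, List.sum_cons]
      by_cases h : d ∈ s <;> simp [h] <;> ring

lemma counter_fold_eq_pvCnt (s : PySem.Set String) (ings : List String) :
    (PySem.Dict.counter ings).items.foldl
      (fun a ic => if PySem.Set.contains s ic.1 then a + ic.2 else a) (0 : Int)
    = pvCnt s 0 ings := by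
  rw [PySem.Dict.items_counter, List.foldl_map]
  have h1 := foldl_if_add s (fun k => (ings.count k : Int)) (PySem.Set.ofList ings) 0
  have h2 := weighted_sum_eq_countP s (PySem.Set.ofList ings) (PySem.Set.nodup_ofList ings) ings
      (fun y hy => (PySem.Set.mem_ofList ings y).mpr hy)
  have h3 := pvCnt_eq_countP s ings 0
  simp only [] at h1 ⊢
  rw [show (fun (a : Int) (k : String) =>
        if PySem.Set.contains s ((fun k => (k, (ings.count k : Int))) k).1 then
          a + ((fun k => (k, (ings.count k : Int))) k).2 else a)
      = (fun (a : Int) (k : String) =>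
        if PySem.Set.contains s k then a + (ings.count k : Int) else a) from rfl]
  rw [h1, h2, h3]

-- ===== VERDICT =====
theorem sufficiency_report_spec : Claim_equal_sufficiency_report := by
  intro ings _
  show _ = _
  simp only [sufficiency_report, sufficiency_report_alt]
  have h0 : (PySem.Dict.ofList (pvCATEGORIES.map (fun ks => (ks.1, (0 : Int)))))
      = PySem.Dict.mk [("protein", 0), ("carb", 0), ("flavor", 0), ("veg", 0)] := by
    simp [pvCATEGORIES, PySem.Dict.ofList, PySem.Dict.empty, PySem.Dict.update,
          PySem.Dict.insert, PySem.Dict.contains]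
  rw [h0, have_fold_eq]
  have hfreq : ings.foldl (fun d x => d.insert x (d.getD x 0 + 1)) PySem.Dict.empty
      = PySem.Dict.counter ings := PySem.Dict.foldl_insert_getD_add_one_eq_counter ings
  rw [hfreq]
  simp only [pvCATEGORIES, List.map_cons, List.map_nil, counter_fold_eq_pvCnt]
  simp [pvMIN_REQUIRED, pvCnt, PySem.Dict.getD, PySem.Dict.get?, PySem.Dict.ofList,
        PySem.Dict.keys, PySem.Dict.values, PySem.Dict.items, PySem.Dict.insert,
        PySem.Dict.contains, PySem.Dict.empty, PySem.Dict.update]
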